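-- pv_equiv track=rewrite | github.com/roctbb/ai-game-engine | games/gate_keys/engine.py | _protected_route
-- ===== SOURCE A (Python) =====
-- _START = (1, 1)
--
-- _GATE_XS = (5, 10, 15)
--
-- def _protected_route(route_rows: list[int], exit_cell: tuple[int, int]) -> set[tuple[int, int]]:
--     route = {_START}
--     current = _START
--     for barrier_x, gate_y in zip(_GATE_XS, route_rows, strict=True):
--         step = 1 if gate_y >= current[1] else -1
--         route.update({(current[0], y) for y in range(current[1], gate_y + step, step)})
--         route.update({(x, gate_y) for x in range(current[0], barrier_x + 2)})
--         current = (barrier_x + 1, gate_y)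
--     step = 1 if exit_cell[1] >= current[1] else -1
--     route.update({(current[0], y) for y in range(current[1], exit_cell[1] + step, step)})
--     route.update({(x, exit_cell[1]) for x in range(current[0], exit_cell[0] + 1)})
--     return route
-- ===== SOURCE B (Python) =====
-- _START = (1, 1)
--
-- _GATE_XS = (5, 10, 15)
--
--
-- def _span(a, b):
--     # inclusive integers from a to b, walking towards b (descending legs are a
--     # reversed ascending range, not a step=-1 range)
--     return list(range(a, b + 1)) if a <= b else list(range(b, a + 1))[::-1]
--
--
-- def _legs(cur, waypoints):
--     # recursively emit one cell set per leg half: the vertical sweep in cur's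
--     # column, then the horizontal sweep in the waypoint's row
--     if not waypoints:
--         return []
--     (cx, cy), (tx, ty) = cur, waypoints[0]
--     vert = {(cx, y) for y in _span(cy, ty)}
--     horiz = {(x, ty) for x in range(cx, tx + 1)}
--     return [vert, horiz] + _legs(waypoints[0], waypoints[1:])
--
--
-- def _protected_route(route_rows: list[int], exit_cell: tuple[int, int]) -> set[tuple[int, int]]:
--     # Pure construction: list all waypoints, recursively build the per-leg cell
--     # sets, and union them in one expression — no mutable running set, no
--     # threaded `current` state, no duplicated tail block.
--     waypoints = [(bx + 1, gy) for bx, gy in zip(_GATE_XS, route_rows, strict=True)]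
--     waypoints.append(exit_cell)
--     return {_START}.union(*_legs(_START, waypoints))
-- ===== Notes on version B (the rewrite author's own statement) =====
-- stated objective: alternative
-- what changed: A mutates one running set while threading a `current` position through a loop plus a duplicated exit tail; B is a pure construction: it lists all waypoints up front, recursively builds one cell set per leg half (descending sweeps as reversed ascending ranges instead of step=-1 ranges), and returns their union in a single expression.
import Mathlib
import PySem

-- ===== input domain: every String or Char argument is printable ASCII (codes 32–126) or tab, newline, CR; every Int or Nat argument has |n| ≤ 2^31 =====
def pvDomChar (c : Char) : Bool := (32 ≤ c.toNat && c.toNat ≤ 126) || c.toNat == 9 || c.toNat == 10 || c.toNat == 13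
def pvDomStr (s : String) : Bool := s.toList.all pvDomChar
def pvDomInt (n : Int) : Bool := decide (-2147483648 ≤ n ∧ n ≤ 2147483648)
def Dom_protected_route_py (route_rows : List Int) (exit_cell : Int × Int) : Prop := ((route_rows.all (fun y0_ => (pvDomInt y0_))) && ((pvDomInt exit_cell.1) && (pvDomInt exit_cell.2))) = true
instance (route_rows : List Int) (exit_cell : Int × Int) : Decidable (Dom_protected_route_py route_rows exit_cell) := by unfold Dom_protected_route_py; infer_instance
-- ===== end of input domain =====

-- B replaces A's stateful loop (mutable running set + threaded `current` + duplicated exit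
-- tail) by a pure construction: a waypoint list, a recursive flattening of the legs into one
-- cell list (descending sweeps as reversed ascending ranges), and one set() at the end.
-- Python returns a set: equality below is on the PySem.Set insertion-order list; the
-- set-comprehension updates of A are ported as Set.update over the generated list (exact as
-- a set; Python's hash iteration order is not modelled).

-- ===== PORT A =====
def protected_route_py (route_rows : List Int) (exit_cell : Int × Int) : List (Int × Int) :=
  let start : Int × Int := (1, 1)
  let st := (List.zip [(5 : Int), 10, 15] route_rows).foldl
    (fun (st : PySem.Set (Int × Int) × (Int × Int)) bg =>
      let route := st.1
      let current := st.2
      let step : Int := if bg.2 ≥ current.2 then 1 else -1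
      let route := PySem.Set.update route
        ((PySem.List.pyRange current.2 (bg.2 + step) step).map (fun y => (current.1, y)))
      let route := PySem.Set.update route
        ((PySem.List.pyRange current.1 (bg.1 + 2) 1).map (fun x => (x, bg.2)))
      (route, (bg.1 + 1, bg.2)))
    (PySem.Set.ofList [start], start)
  let route := st.1
  let current := st.2
  let step : Int := if exit_cell.2 ≥ current.2 then 1 else -1
  let route := PySem.Set.update route
    ((PySem.List.pyRange current.2 (exit_cell.2 + step) step).map (fun y => (current.1, y)))
  let route := PySem.Set.update route
    ((PySem.List.pyRange current.1 (exit_cell.1 + 1) 1).map (fun x => (x, exit_cell.2)))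
  route

-- ===== PORT B =====
-- _span: descending legs are a reversed ascending range ([::-1] is List.reverse)
def pvSpan (a b : Int) : List Int :=
  if a ≤ b then PySem.List.pyRange a (b + 1) 1
  else (PySem.List.pyRange b (a + 1) 1).reverse

-- _legs: recursion over the waypoint list; each set comprehension is Set.ofList of the generated list
def pvLegs (cur : Int × Int) (waypoints : List (Int × Int)) : List (List (Int × Int)) :=
  match waypoints with
  | [] => []
  | t :: rest =>
      PySem.Set.ofList ((pvSpan cur.2 t.2).map (fun y => (cur.1, y)))
      :: PySem.Set.ofList ((PySem.List.pyRange cur.1 (t.1 + 1) 1).map (fun x => (x, t.2)))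
      :: pvLegs t rest

-- {_START}.union(*legs): fold Set.union over the leg sets
def protected_route_py_alt (route_rows : List Int) (exit_cell : Int × Int) : List (Int × Int) :=
  let waypoints := ((List.zip [(5 : Int), 10, 15] route_rows).map (fun bg => (bg.1 + 1, bg.2)))
      ++ [exit_cell]
  (pvLegs (1, 1) waypoints).foldl PySem.Set.union (PySem.Set.ofList [((1 : Int), (1 : Int))])

-- ===== PRECONDITION & SPEC =====
-- zip(_GATE_XS, route_rows, strict=True) raises ValueError unless route_rows has exactly 3 rows.
def Pre_protected_route_py (route_rows : List Int) (exit_cell : Int × Int) : Prop :=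
  route_rows.length = 3
instance (route_rows : List Int) (exit_cell : Int × Int) : Decidable (Pre_protected_route_py route_rows exit_cell) := by unfold Pre_protected_route_py; infer_instance

def pvWitness_protected_route_py : List Int × (Int × Int) := ([1, 4, 2], (18, 3))

def Spec_protected_route_py (route_rows : List Int) (exit_cell : Int × Int) (out : List (Int × Int)) : Prop := out = protected_route_py_alt route_rows exit_cell
instance (route_rows : List Int) (exit_cell : Int × Int) (out : List (Int × Int)) : Decidable (Spec_protected_route_py route_rows exit_cell out) := by unfold Spec_protected_route_py; infer_instance

-- ===== CLAIM (what is proved, stated in full; the proofs are below) =====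
def Claim_equal_protected_route_py : Prop := ∀ (route_rows : List Int) (exit_cell : Int × Int), Dom_protected_route_py route_rows exit_cell → Pre_protected_route_py route_rows exit_cell → Spec_protected_route_py route_rows exit_cell (protected_route_py route_rows exit_cell)

-- ===== LEMMAS AND PROOFS =====

-- updating with l ++ m is two successive updates
theorem pvUpdate_append {α : Type} [BEq α] (s : PySem.Set α) (l m : List α) :
    PySem.Set.update s (l ++ m) = PySem.Set.update (PySem.Set.update s l) m := by
  simp [PySem.Set.update, List.foldl_append]

-- B's span is exactly A's ±step inclusive range
theorem pvSpan_eq (a b : Int) :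
    pvSpan a b
      = PySem.List.pyRange a (b + (if b ≥ a then 1 else -1)) (if b ≥ a then 1 else -1) := by
  unfold pvSpan
  by_cases h : a ≤ b
  · simp [h, ge_iff_le]
  · simp [h, ge_iff_le]
    rw [show b + -1 = (b - 1) by ring, PySem.List.pyRange_neg_one_eq_reverse]
    rw [show b - 1 + 1 = b by ring]

-- updating with an already-deduplicated list updates with the raw list
theorem pvUpdate_foldl_add {α : Type} [BEq α] [LawfulBEq α] (l : List α) :
    ∀ (t s : PySem.Set α),
      PySem.Set.update s (List.foldl PySem.Set.add t l)
        = PySem.Set.update (PySem.Set.update s t) l := by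
  induction l with
  | nil => intro t s; rfl
  | cons x l ih =>
    intro t s
    simp only [List.foldl]
    by_cases h : x ∈ t
    · rw [show PySem.Set.add t x = t from by simp [PySem.Set.add, h]]
      rw [ih t s]
      have hx : x ∈ PySem.Set.update s t := (PySem.Set.mem_update s t x).mpr (Or.inr h)
      rw [show PySem.Set.update (PySem.Set.update s t) (x :: l)
            = PySem.Set.update (PySem.Set.add (PySem.Set.update s t) x) l from rfl]
      rw [show PySem.Set.add (PySem.Set.update s t) x = PySem.Set.update s t from by
        simp [PySem.Set.add, hx]]
    · rw [ih (PySem.Set.add t x) s]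
      rw [show PySem.Set.add t x = t ++ [x] from by simp [PySem.Set.add, h]]
      rw [pvUpdate_append]
      rfl

theorem pvUpdate_ofList {α : Type} [BEq α] [LawfulBEq α] (s : PySem.Set α) (l : List α) :
    PySem.Set.update s (PySem.Set.ofList l) = PySem.Set.update s l := by
  rw [PySem.Set.ofList_eq_foldl, pvUpdate_foldl_add]
  rfl

-- ===== VERDICT (by name: the statement is the Claim_ definition above) =====
theorem protected_route_py_spec : Claim_equal_protected_route_py := by
  intro route_rows exit_cell _ hpre
  unfold Spec_protected_route_py
  obtain ⟨ex, ey⟩ := exit_cell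
  match route_rows, hpre with
  | [a, b, c], _ =>
    simp only [protected_route_py, protected_route_py_alt, List.zip, List.zipWith,
      List.map, List.foldl, List.cons_append, List.nil_append, pvLegs, pvSpan_eq,
      PySem.Set.union, pvUpdate_ofList]
    norm_num
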